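-- pv_equiv track=rewrite | github.com/Lenuxx99/leli | extract_info_llm.py | clean_documents
-- ===== SOURCE A (Python) =====
-- def clean_documents(documents):
--     cleaned_docs = []
--     for source, text in documents.items():
--         # Zeilenumbrüche ersetzen
--         text = text.replace("\n", " ")
--
--         # Mehrere Leerzeichen reduzieren
--         while "  " in text:
--             text = text.replace("  ", " ")
--
--         # Dokument klar trennen
--         cleaned_text = f"Dateiname: {source}\nText: {text}\n--- Dokument Ende ---\n"
--         cleaned_docs.append(cleaned_text)
--
--     return "\n".join(cleaned_docs)
-- ===== SOURCE B (Python) =====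
-- def clean_documents(documents):
--     def collapse(text):
--         buf = []
--         for ch in text:
--             c = ' ' if ch == '\n' else ch
--             if not (c == ' ' and buf and buf[-1] == ' '):
--                 buf.append(c)
--         return ''.join(buf)
--     return "\n".join(
--         f"Dateiname: {source}\nText: {collapse(text)}\n--- Dokument Ende ---\n"
--         for source, text in documents.items()
--     )
-- ===== Notes on version B (the rewrite author's own statement) =====
-- stated objective: alternative
-- what changed: The fixpoint loop of repeated ' '->' ' replaces is replaced by a single left-to-right character scan that maps '\n' to ' ' and skips a space whenever the last emitted character was a space, and the accumulate-then-join outer loop becomes a comprehension.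
import Mathlib
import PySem

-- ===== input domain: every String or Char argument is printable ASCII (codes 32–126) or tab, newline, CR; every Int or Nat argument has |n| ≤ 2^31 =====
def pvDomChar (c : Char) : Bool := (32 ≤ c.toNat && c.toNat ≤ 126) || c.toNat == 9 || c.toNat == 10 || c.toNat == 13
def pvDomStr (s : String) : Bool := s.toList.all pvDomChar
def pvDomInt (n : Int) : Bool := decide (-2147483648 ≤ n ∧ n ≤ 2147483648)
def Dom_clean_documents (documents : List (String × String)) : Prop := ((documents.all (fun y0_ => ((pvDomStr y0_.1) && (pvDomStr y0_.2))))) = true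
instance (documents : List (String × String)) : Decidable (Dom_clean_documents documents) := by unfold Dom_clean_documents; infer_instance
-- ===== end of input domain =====

-- B replaces A's repeated-replace whitespace fixpoint by one linear character scan (alternative decomposition, same results).

-- ===== PORT A =====
-- one pass of text.replace("  ", " ") as a structural function (used only to prove
-- termination of the while loop; the port itself calls PySem.Str.replace)
def pvRep : List Char → List Char
  | [] => []
  | [c] => [c]
  | c1 :: c2 :: t => if c1 = ' ' ∧ c2 = ' ' then ' ' :: pvRep t else c1 :: pvRep (c2 :: t)

-- '"  " in text' as a structural predicate
def pvHasDD : List Char → Bool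
  | c1 :: c2 :: t => (c1 == ' ' && c2 == ' ') || pvHasDD (c2 :: t)
  | _ => false

-- The next three lemmas are needed by the port's decreasing_by (allowed above the port).
theorem pvRep_go (fuel : Nat) : ∀ (l acc : List Char), l.length ≤ fuel →
    PySem.Chars.replace.go [' ', ' '] [' '] fuel l acc = acc.reverse ++ pvRep l := by
  induction fuel with
  | zero =>
    intro l acc h
    have hl : l = [] := List.length_eq_zero_iff.mp (Nat.le_zero.mp h)
    subst hl; simp [PySem.Chars.replace.go, pvRep]
  | succ f IH =>
    intro l acc h
    match l with
    | [] => simp [PySem.Chars.replace.go, pvRep]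
    | [c] =>
      have hpre : ([' ', ' '] : List Char).isPrefixOf [c] = false := by
        simp [List.isPrefixOf]
      simp only [PySem.Chars.replace.go, hpre]
      rw [IH [] (c :: acc) (by simp)]
      simp [pvRep]
    | c1 :: c2 :: t =>
      by_cases hc : c1 = ' ' ∧ c2 = ' '
      · obtain ⟨h1, h2⟩ := hc; subst h1; subst h2
        have hpre : ([' ', ' '] : List Char).isPrefixOf (' ' :: ' ' :: t) = true := by
          simp [List.isPrefixOf]
        simp only [PySem.Chars.replace.go, hpre]
        rw [show (' ' :: ' ' :: t).drop [' ', ' '].length = t from rfl]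
        rw [IH t (([' '] : List Char).reverse ++ acc) (by simp at h ⊢; omega)]
        simp [pvRep]
      · have hpre : ([' ', ' '] : List Char).isPrefixOf (c1 :: c2 :: t) = false := by
          rcases Classical.not_and_iff_not_or_not.mp hc with h1 | h1 <;>
            simp [List.isPrefixOf] <;> tauto
        simp only [PySem.Chars.replace.go, hpre]
        rw [IH (c2 :: t) (c1 :: acc) (by simp at h ⊢; omega)]
        simp [pvRep, hc]

theorem pvRep_replace (l : List Char) :
    PySem.Chars.replace l [' ', ' '] [' '] = pvRep l := by
  rw [PySem.Chars.replace]
  simp only [List.isEmpty_cons]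
  rw [pvRep_go l.length l [] le_rfl]
  simp

theorem pvHasDD_iff (l : List Char) : pvHasDD l = true ↔ [' ', ' '] <:+: l := by
  induction l using pvHasDD.induct with
  | case1 c1 c2 t IH =>
    constructor
    · intro h
      simp only [pvHasDD, Bool.or_eq_true, Bool.and_eq_true, beq_iff_eq] at h
      rcases h with ⟨h1, h2⟩ | h
      · subst h1; subst h2; exact List.infix_cons_iff.mpr (Or.inl (by simp))
      · exact List.infix_cons_iff.mpr (Or.inr (IH.mp h))
    · intro h
      rcases List.infix_cons_iff.mp h with h | h
      · rcases List.cons_prefix_cons.mp h with ⟨h1, h2⟩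
        rcases List.cons_prefix_cons.mp h2 with ⟨h3, _⟩
        simp only [pvHasDD, Bool.or_eq_true, Bool.and_eq_true, beq_iff_eq]
        exact Or.inl ⟨h1.symm, h3.symm⟩
      · simp [pvHasDD, IH.mpr h]
  | case2 l hl =>
    cases l with
    | nil => simp [pvHasDD]
    | cons c t =>
      cases t with
      | cons c2 t2 => exact (hl c c2 t2 rfl).elim
      | nil =>
        rw [show pvHasDD [c] = false from rfl]
        simp only [Bool.false_eq_true, false_iff]
        intro h
        rcases List.infix_cons_iff.mp h with h | h
        · rcases List.cons_prefix_cons.mp h with ⟨_, h2⟩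
          exact absurd h2 (by simp)
        · exact absurd h (by simp)

theorem pvIsIn_hasDD (l : List Char) : PySem.Chars.isIn [' ', ' '] l = pvHasDD l := by
  cases h : pvHasDD l
  · exact (PySem.Chars.isIn_eq_false_iff _ _).mpr (fun hin => by
      simp [(pvHasDD_iff l).mpr hin] at h)
  · exact (PySem.Chars.isIn_iff_infix _ _).mpr ((pvHasDD_iff l).mp h)

theorem pvRep_length_le (l : List Char) : (pvRep l).length ≤ l.length := by
  induction l using pvRep.induct with
  | case1 => simp [pvRep]
  | case2 c => simp [pvRep]
  | case3 c1 c2 t h IH => simp [pvRep, h]; simp at IH; omega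
  | case4 c1 c2 t h IH => simp [pvRep, h]; simpa using IH

theorem pvRep_length_lt (l : List Char) (h : pvHasDD l = true) :
    (pvRep l).length < l.length := by
  induction l using pvRep.induct with
  | case1 => simp [pvHasDD] at h
  | case2 c => simp [pvHasDD] at h
  | case3 c1 c2 t hc IH =>
    have := pvRep_length_le t
    simp [pvRep, hc]; omega
  | case4 c1 c2 t hc IH =>
    simp only [pvHasDD, Bool.or_eq_true, Bool.and_eq_true, beq_iff_eq] at h
    rcases h with h | h
    · exact absurd h hc
    · have := IH h
      simp [pvRep, hc]; simp at this; omega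

-- the 'while "  " in text: text = text.replace("  ", " ")' loop
def pvWhileA (s : String) : String :=
  if PySem.Str.isIn "  " s = true then pvWhileA (PySem.Str.replace s "  " " ") else s
termination_by s.toList.length
decreasing_by
  rename_i h
  rw [PySem.Str.isIn_eq, show ("  " : String).toList = [' ', ' '] from rfl,
    pvIsIn_hasDD] at h
  rw [PySem.Str.toList_replace, show ("  " : String).toList = [' ', ' '] from rfl,
    show (" " : String).toList = [' '] from rfl, pvRep_replace]
  exact pvRep_length_lt _ h

def clean_documents (documents : List (String × String)) : String :=
  PySem.Str.join "\n"
    (documents.foldl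
      (fun cleaned_docs p =>
        cleaned_docs ++
          ["Dateiname: " ++ p.1 ++ "\nText: " ++
            pvWhileA (PySem.Str.replace p.2 "\n" " ") ++ "\n--- Dokument Ende ---\n"])
      [])

-- ===== PORT B =====
-- one step of B's scan: map '\n' to ' ', append unless a space follows an emitted space
def pvScanStep (buf : List Char) (ch : Char) : List Char :=
  let c := if ch = '\n' then ' ' else ch
  if c == ' ' && buf.getLast? == some ' ' then buf else buf ++ [c]

def pvCollapse (text : String) : String :=
  String.ofList (text.toList.foldl pvScanStep [])

def clean_documents_alt (documents : List (String × String)) : String :=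
  PySem.Str.join "\n"
    (documents.map (fun p =>
      "Dateiname: " ++ p.1 ++ "\nText: " ++ pvCollapse p.2 ++ "\n--- Dokument Ende ---\n"))

-- ===== PRECONDITION & SPEC =====
def Spec_clean_documents (documents : List (String × String)) (out : String) : Prop := out = clean_documents_alt documents
instance (documents : List (String × String)) (out : String) : Decidable (Spec_clean_documents documents out) := by unfold Spec_clean_documents; infer_instance

-- ===== CLAIM (what is proved, stated in full; the proofs are below) =====
def Claim_equal_clean_documents : Prop := ∀ (documents : List (String × String)), Dom_clean_documents documents → Spec_clean_documents documents (clean_documents documents)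

-- ===== LEMMAS AND PROOFS =====

-- '\n' → ' ' as a character map
def pvNl (c : Char) : Char := if c = '\n' then ' ' else c

-- space collapse of an already-newline-mapped list; the flag says "last emitted char was ' '"
def pvColS : Bool → List Char → List Char
  | _, [] => []
  | b, c :: t =>
    if c = ' ' then (if b then pvColS true t else ' ' :: pvColS true t)
    else c :: pvColS false t

theorem pvNl_go (fuel : Nat) : ∀ (l acc : List Char), l.length ≤ fuel →
    PySem.Chars.replace.go ['\n'] [' '] fuel l acc = acc.reverse ++ l.map pvNl := by
  induction fuel with
  | zero =>
    intro l acc h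
    have hl : l = [] := List.length_eq_zero_iff.mp (Nat.le_zero.mp h)
    subst hl; simp [PySem.Chars.replace.go]
  | succ f IH =>
    intro l acc h
    match l with
    | [] => simp [PySem.Chars.replace.go]
    | c :: t =>
      by_cases hc : c = '\n'
      · subst hc
        have hpre : (['\n'] : List Char).isPrefixOf ('\n' :: t) = true := by
          simp [List.isPrefixOf]
        simp only [PySem.Chars.replace.go, hpre]
        rw [show ('\n' :: t).drop ['\n'].length = t from rfl]
        rw [IH t (([' '] : List Char).reverse ++ acc) (by simp at h ⊢; omega)]
        simp [pvNl]
      · have hpre : (['\n'] : List Char).isPrefixOf (c :: t) = false := by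
          simp [List.isPrefixOf]; exact fun h' => absurd h'.symm hc
        simp only [PySem.Chars.replace.go, hpre]
        rw [IH t (c :: acc) (by simp at h ⊢; omega)]
        simp [pvNl, hc]

theorem pvNl_replace (l : List Char) :
    PySem.Chars.replace l ['\n'] [' '] = l.map pvNl := by
  rw [PySem.Chars.replace]
  simp only [List.isEmpty_cons]
  rw [pvNl_go l.length l [] le_rfl]
  simp

theorem pvColS_rep (l : List Char) : ∀ b, pvColS b (pvRep l) = pvColS b l := by
  induction l using pvRep.induct with
  | case1 => intro b; rfl
  | case2 c => intro b; rfl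
  | case3 c1 c2 t h IH =>
    obtain ⟨h1, h2⟩ := h; subst h1; subst h2
    intro b
    cases b <;> simp [pvRep, pvColS, IH]
  | case4 c1 c2 t h IH =>
    intro b
    by_cases h1 : c1 = ' '
    · subst h1
      have h2 : ¬ c2 = ' ' := fun hh => h ⟨rfl, hh⟩
      cases b <;> simp [pvRep, pvColS, h2, IH]
    · cases b <;> simp [pvRep, pvColS, h1, IH]

theorem pvColS_id (l : List Char) (h : pvHasDD l = false) : pvColS false l = l := by
  induction l using pvHasDD.induct with
  | case1 c1 c2 t IH =>
    simp only [pvHasDD, Bool.or_eq_false_iff, Bool.and_eq_false_iff, beq_eq_false_iff_ne] at h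
    obtain ⟨hns, ht⟩ := h
    by_cases h1 : c1 = ' '
    · subst h1
      have h2 : ¬ c2 = ' ' := hns.resolve_left (fun hc => hc rfl)
      have ih' : pvColS false t = t := by
        have ih := IH ht
        simp [pvColS, h2] at ih
        exact ih
      simp [pvColS, h2, ih']
    · have ih := IH ht
      rw [show pvColS false (c1 :: c2 :: t) = c1 :: pvColS false (c2 :: t) by
        simp [pvColS, h1], ih]
  | case2 l hl =>
    cases l with
    | nil => rfl
    | cons c t =>
      cases t with
      | cons c2 t2 => exact (hl c c2 t2 rfl).elim
      | nil => by_cases h1 : c = ' ' <;> simp [pvColS, h1]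

theorem pvWhileA_toList (s : String) :
    (pvWhileA s).toList = pvColS false s.toList := by
  induction s using pvWhileA.induct with
  | case1 s h IH =>
    rw [pvWhileA, if_pos h, IH]
    rw [PySem.Str.toList_replace, show ("  " : String).toList = [' ', ' '] from rfl,
      show (" " : String).toList = [' '] from rfl, pvRep_replace]
    exact pvColS_rep _ _
  | case2 s h =>
    rw [pvWhileA, if_neg h]
    rw [PySem.Str.isIn_eq, show ("  " : String).toList = [' ', ' '] from rfl,
      pvIsIn_hasDD, Bool.not_eq_true] at h
    exact (pvColS_id _ h).symm

theorem pvScanStep_eq (buf : List Char) (c : Char) :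
    pvScanStep buf c =
      if (pvNl c == ' ' && buf.getLast? == some ' ') then buf else buf ++ [pvNl c] := rfl

theorem pvScan_fold (l : List Char) : ∀ (buf : List Char),
    l.foldl pvScanStep buf = buf ++ pvColS (buf.getLast? == some ' ') (l.map pvNl) := by
  induction l with
  | nil => intro buf; simp [pvColS]
  | cons c t IH =>
    intro buf
    rw [List.foldl_cons, pvScanStep_eq, List.map_cons]
    by_cases hc : pvNl c = ' '
    · rw [hc]
      by_cases hb : buf.getLast? = some ' '
      · rw [hb]
        simp only [BEq.rfl, Bool.and_self, if_true]
        rw [IH buf, hb]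
        simp [pvColS]
      · rw [show ((' ' : Char) == ' ' && buf.getLast? == some ' ') = false by
          simp [hb], if_neg (by simp)]
        rw [IH (buf ++ [' ']), List.getLast?_concat]
        rw [show (buf.getLast? == some ' ') = false from beq_eq_false_iff_ne.mpr hb]
        simp [pvColS]
    · have hcb : (pvNl c == ' ') = false := beq_eq_false_iff_ne.mpr hc
      rw [show (pvNl c == ' ' && buf.getLast? == some ' ') = false by simp [hcb],
        if_neg (by simp)]
      rw [IH (buf ++ [pvNl c]), List.getLast?_concat]
      rw [show ((some (pvNl c) : Option Char) == some ' ') = false by simp [hc]]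
      rw [show pvColS (buf.getLast? == some ' ') (pvNl c :: t.map pvNl)
            = pvNl c :: pvColS false (t.map pvNl) by
        cases hx : (buf.getLast? == some ' ') <;> simp [pvColS, hc]]
      simp

theorem pvInner_eq (t : String) :
    pvWhileA (PySem.Str.replace t "\n" " ") = pvCollapse t := by
  have h1 : (pvWhileA (PySem.Str.replace t "\n" " ")).toList = t.toList.foldl pvScanStep [] := by
    rw [pvWhileA_toList, PySem.Str.toList_replace,
      show ("\n" : String).toList = ['\n'] from rfl,
      show (" " : String).toList = [' '] from rfl, pvNl_replace,
      pvScan_fold t.toList []]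
    rfl
  rw [← String.ofList_toList (s := pvWhileA (PySem.Str.replace t "\n" " ")), h1, pvCollapse]

-- ===== VERDICT (by name: the statement is the Claim_ definition above) =====
theorem clean_documents_spec : Claim_equal_clean_documents := by
  intro documents _
  unfold Spec_clean_documents clean_documents clean_documents_alt
  rw [PySem.List.foldl_append_singleton_eq_map
    (fun p : String × String =>
      "Dateiname: " ++ p.1 ++ "\nText: " ++
        pvWhileA (PySem.Str.replace p.2 "\n" " ") ++ "\n--- Dokument Ende ---\n")]
  simp only [List.nil_append, pvInner_eq]
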